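-- pv_equiv track=rewrite | github.com/jotica0602/AoC | 2025/day_9/day_9.py | encode_axis
-- ===== SOURCE A (Python) =====
-- def encode_axis(axis):
--     encoded_axis = {axis[0]:0}
--     gap = 1
--     for i in range(1,len(axis)):
--         if axis[i-1] != axis[i] - 1:
--             gap += 1
--         encoded_axis[axis[i]] = gap
--         gap += 1
--     return encoded_axis
-- ===== SOURCE B (Python) =====
-- def encode_axis(axis):
--     n = len(axis)
--     breaks = [0] + [1 if axis[i - 1] != axis[i] - 1 else 0 for i in range(1, n)]
--     cum = []
--     total = 0
--     for b in breaks: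
--         total += b
--         cum.append(total)
--     return {axis[i]: i + cum[i] for i in range(n)}
-- ===== Notes on version B (the rewrite author's own statement) =====
-- stated objective: alternative
-- what changed: Replaces A's single stateful loop that interleaves the gap counter with dict insertion by a build-table-then-map decomposition: a breaks indicator list, its running prefix sums, and a final dict comprehension axis[i] -> i + cum[i].
import Mathlib
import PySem

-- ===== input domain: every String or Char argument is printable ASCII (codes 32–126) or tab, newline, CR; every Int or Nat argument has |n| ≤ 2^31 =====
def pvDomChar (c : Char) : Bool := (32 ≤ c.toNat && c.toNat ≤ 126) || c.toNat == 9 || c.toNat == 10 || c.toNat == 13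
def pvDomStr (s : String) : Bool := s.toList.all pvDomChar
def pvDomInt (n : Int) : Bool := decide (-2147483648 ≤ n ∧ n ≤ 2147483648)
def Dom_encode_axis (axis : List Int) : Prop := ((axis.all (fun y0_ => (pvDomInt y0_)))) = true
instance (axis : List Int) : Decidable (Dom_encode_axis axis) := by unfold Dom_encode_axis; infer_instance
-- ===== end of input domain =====

-- B replaces A's single incremental dict+gap loop by a build-table-then-map decomposition
-- (breaks list, its prefix sums, then a dict comprehension); objective: alternative, same cost.

-- ===== PORT A =====
def encode_axis (axis : List Int) : List (Int × Int) :=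
  match PySem.List.pyGet? axis 0 with
  | none => []   -- axis[0] raises IndexError on the empty list; excluded by Pre_
  | some a0 =>
    ((PySem.List.pyRange 1 (axis.length : Int) 1).foldl
      (fun (st : PySem.Dict Int Int × Int) (i : Int) =>
        let gap : Int :=
          if PySem.List.pyGetD axis (i - 1) 0 ≠ PySem.List.pyGetD axis i 0 - 1
          then st.2 + 1 else st.2
        (st.1.insert (PySem.List.pyGetD axis i 0) gap, gap + 1))
      (PySem.Dict.empty.insert a0 0, 1)).1.items

-- ===== PORT B =====
-- breaks[0] = 0; breaks[i] = 1 iff axis[i-1] != axis[i] - 1  (i ≥ 1)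
def bBreaks (axis : List Int) : List Int :=
  0 :: (PySem.List.pyRange 1 (axis.length : Int) 1).map
    (fun i => if PySem.List.pyGetD axis (i - 1) 0 ≠ PySem.List.pyGetD axis i 0 - 1 then 1 else 0)

-- running prefix sums of the breaks list (Source B's `cum` loop)
def bCum (axis : List Int) : List Int :=
  ((bBreaks axis).foldl (fun (p : List Int × Int) b => (p.1 ++ [p.2 + b], p.2 + b)) ([], 0)).1

def encode_axis_alt (axis : List Int) : List (Int × Int) :=
  ((PySem.List.pyRange 0 (axis.length : Int) 1).foldl
    (fun (d : PySem.Dict Int Int) (i : Int) =>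
      d.insert (PySem.List.pyGetD axis i 0) (i + PySem.List.pyGetD (bCum axis) i 0))
    PySem.Dict.empty).items

-- ===== PRECONDITION & SPEC =====
-- Pre_ excludes only the empty list, on which A raises IndexError (axis[0]).
def Pre_encode_axis (axis : List Int) : Prop := axis ≠ []
instance (axis : List Int) : Decidable (Pre_encode_axis axis) := by unfold Pre_encode_axis; infer_instance
def pvWitness_encode_axis : List Int := [3, 4, 7, 8]

def Spec_encode_axis (axis : List Int) (out : List (Int × Int)) : Prop := out = encode_axis_alt axis
instance (axis : List Int) (out : List (Int × Int)) : Decidable (Spec_encode_axis axis out) := by unfold Spec_encode_axis; infer_instance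

-- ===== CLAIM (what is proved, stated in full; the proofs are below) =====
def Claim_equal_encode_axis : Prop := ∀ (axis : List Int), Dom_encode_axis axis → Pre_encode_axis axis → Spec_encode_axis axis (encode_axis axis)

-- ===== LEMMAS AND PROOFS =====

-- the break indicator at index i (meaningful for 1 ≤ i < axis.length)
def brkA (axis : List Int) (i : Int) : Int :=
  if PySem.List.pyGetD axis (i - 1) 0 ≠ PySem.List.pyGetD axis i 0 - 1 then 1 else 0

-- cumulative number of breaks among indices 1..k
def cumF (axis : List Int) : Nat → Int
  | 0 => 0
  | k + 1 => cumF axis k + brkA axis ((k : Int) + 1)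

-- running prefix sums starting from t
def psums (t : Int) : List Int → List Int
  | [] => []
  | b :: bs => (t + b) :: psums (t + b) bs

-- Source B's accumulation loop produces the prefix sums
theorem scan_eq_psums (l : List Int) (acc : List Int) (t : Int) :
    (l.foldl (fun (p : List Int × Int) b => (p.1 ++ [p.2 + b], p.2 + b)) (acc, t)).1
      = acc ++ psums t l := by
  induction l generalizing acc t with
  | nil => simp [psums]
  | cons b bs ih => simp [psums, ih]

-- prefix sums of the break indicators over a range are cumF
theorem psums_breaks (axis : List Int) (m k : Nat) :
    psums (cumF axis k) ((PySem.List.pyRange ((k : Int) + 1) ((k : Int) + 1 + (m : Int)) 1).map (brkA axis))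
      = (List.range m).map (fun j => cumF axis (k + 1 + j)) := by
  induction m generalizing k with
  | zero => simp [PySem.List.pyRange_one_eq_nil, psums]
  | succ m ih =>
    rw [PySem.List.pyRange_one_cons (by omega)]
    have h2 : (k : Int) + 1 + ((m + 1 : Nat) : Int) = ((k + 1 : Nat) : Int) + 1 + (m : Int) := by push_cast; ring
    rw [h2, List.map_cons]
    show psums (cumF axis k) (brkA axis ((k:Int)+1) :: _) = _
    rw [psums]
    have hc : cumF axis k + brkA axis ((k:Int)+1) = cumF axis (k + 1) := by rw [cumF]
    rw [hc]
    rw [show ((k:Int) + 1 + 1) = ((k + 1 : Nat) : Int) + 1 from by push_cast; ring]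
    rw [ih (k + 1)]
    simp only [List.range_succ_eq_map, List.map_cons, List.map_map, Nat.add_zero, List.cons.injEq]
    refine ⟨trivial, ?_⟩
    apply List.map_congr_left
    intro j hj
    simp only [Function.comp_apply]
    congr 1
    omega

theorem bCum_eq (axis : List Int) (h : axis ≠ []) :
    bCum axis = 0 :: (List.range (axis.length - 1)).map (fun j => cumF axis (1 + j)) := by
  have hn : 1 ≤ axis.length := by cases axis <;> simp_all
  have hmap : (fun i => if PySem.List.pyGetD axis (i - 1) 0 ≠ PySem.List.pyGetD axis i 0 - 1 then (1:Int) else 0) = brkA axis := by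
    funext i; rfl
  unfold bCum bBreaks
  rw [hmap, scan_eq_psums, psums]
  rw [show ((1:Int)) = ((0:Nat):Int) + 1 from by norm_num] at *
  have := psums_breaks axis (axis.length - 1) 0
  simp only [Nat.cast_zero, zero_add] at this ⊢
  rw [show ((axis.length : Int)) = 1 + ((axis.length - 1 : Nat) : Int) from by omega]
  simp [cumF] at this ⊢
  rw [this]

theorem bCum_getD (axis : List Int) (h : axis ≠ []) (k : Nat) (hk : k < axis.length) :
    PySem.List.pyGetD (bCum axis) (k : Int) 0 = cumF axis k := by
  rw [bCum_eq axis h]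
  rw [PySem.List.pyGetD_natCast]
  cases k with
  | zero => simp [cumF]
  | succ j =>
    simp only [List.getD_cons_succ]
    rw [List.getD_eq_getElem _ _ (by simp; omega)]
    simp
    congr 1
    omega

-- invariant of A's loop: after the first k iterations the gap counter equals
-- k + cumF k + 1 and the dict is the pure insert fold of (axis[i], i + cumF i)
theorem A_inv (axis : List Int) (d0 : PySem.Dict Int Int) (k : Nat) :
    (PySem.List.pyRange 1 (1 + (k : Int)) 1).foldl
      (fun (st : PySem.Dict Int Int × Int) (i : Int) =>
        let gap : Int :=
          if PySem.List.pyGetD axis (i - 1) 0 ≠ PySem.List.pyGetD axis i 0 - 1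
          then st.2 + 1 else st.2
        (st.1.insert (PySem.List.pyGetD axis i 0) gap, gap + 1))
      (d0, 1)
    = ((PySem.List.pyRange 1 (1 + (k : Int)) 1).foldl
        (fun (d : PySem.Dict Int Int) (i : Int) =>
          d.insert (PySem.List.pyGetD axis i 0) (i + cumF axis i.toNat)) d0,
       (k : Int) + cumF axis k + 1) := by
  induction k with
  | zero => simp [PySem.List.pyRange_one_eq_nil, cumF]
  | succ k ih =>
    rw [show (1 + ((k+1 : Nat) : Int)) = (1 + (k:Int)) + 1 from by push_cast; ring]
    rw [PySem.List.pyRange_one_succ_right (by omega)]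
    rw [List.foldl_append, List.foldl_append, ih]
    simp only [List.foldl_cons, List.foldl_nil]
    have htn : (1 + (k:Int)).toNat = k + 1 := by omega
    have hbrk : (if PySem.List.pyGetD axis (1 + (k:Int) - 1) 0 ≠ PySem.List.pyGetD axis (1 + (k:Int)) 0 - 1
          then ((k:Int) + cumF axis k + 1) + 1 else ((k:Int) + cumF axis k + 1))
        = (1 + (k:Int)) + cumF axis (k+1) := by
      rw [show (1 + (k:Int)) = (k:Int) + 1 from by ring, cumF, brkA]
      split_ifs <;> ring
    simp only [hbrk, htn, Prod.mk.injEq]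
    exact ⟨trivial, by push_cast; ring⟩

theorem encode_axis_eq_alt (axis : List Int) (h : axis ≠ []) :
    encode_axis axis = encode_axis_alt axis := by
  obtain ⟨a, rest, rfl⟩ : ∃ a rest, axis = a :: rest := by
    cases axis with | nil => exact absurd rfl h | cons a r => exact ⟨a, r, rfl⟩
  set axis := a :: rest with haxis
  have hn : 1 ≤ axis.length := by simp [haxis]
  have hget : PySem.List.pyGet? axis 0 = some a := by
    simp [haxis, PySem.List.pyGet?, PySem.List.pyIdx?]
  -- A side: loop invariant
  rw [encode_axis, hget]
  dsimp only
  rw [show ((axis.length : Int)) = 1 + ((axis.length - 1 : Nat) : Int) from by omega]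
  rw [A_inv]
  -- B side: peel off index 0, then the remaining folds agree pointwise
  rw [encode_axis_alt]
  rw [PySem.List.pyRange_one_cons (a := 0) (b := (axis.length : Int)) (by omega)]
  rw [List.foldl_cons]
  have h0 : PySem.List.pyGetD axis 0 0 = a := by simp [haxis]
  have hc0 : PySem.List.pyGetD (bCum axis) 0 0 = cumF axis 0 := by
    exact_mod_cast bCum_getD axis h 0 (by omega)
  rw [h0, hc0]
  simp only [cumF, add_zero]
  rw [show (0:Int) + 1 = 1 from by ring]
  rw [show ((axis.length : Int)) = 1 + ((axis.length - 1 : Nat) : Int) from by omega]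
  congr 1
  apply PySem.List.foldl_congr_mem
  intro d i hi
  have hi' := (PySem.List.mem_pyRange_one).1 hi
  have : PySem.List.pyGetD (bCum axis) i 0 = cumF axis i.toNat := by
    have := bCum_getD axis h i.toNat (by omega)
    rwa [show ((i.toNat : Nat) : Int) = i from by omega] at this
  rw [this]

-- ===== VERDICT (by name: the statement is the Claim_ definition above) =====
theorem encode_axis_spec : Claim_equal_encode_axis := by
  intro axis _ hpre
  exact encode_axis_eq_alt axis hpre
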